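-- pv_equiv track=rewrite | github.com/Skyler-Cobb/CodeTranslator | codec.py | decode_recursive
-- ===== SOURCE A (Python) =====
-- def expand_in_mapping(token: str, mapping: dict, flawed: bool = False) -> list:
--     """
--     Given a token and a mapping dict, return all the mapped values as a list.
--     If token is not in mapping:
--       - return [token] if flawed=True
--       - return []        if flawed=False
--     """
--     if token in mapping:
--         val = mapping[token]
--         return val if isinstance(val, list) else [val]
--     return [token] if flawed else []
--
-- def decode_recursive(word, mapping, flawed=False):
--     """Backtracking decode when no separators / fixed width exist."""
--     memo = {}
--
--     def dfs(rem):
--         if rem == "":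
--             return [""]
--         if rem in memo:
--             return memo[rem]
--
--         results = []
--         matched = False
--         for key in mapping:
--             if rem.startswith(key):
--                 for head in expand_in_mapping(key, mapping, False):
--                     for tail in dfs(rem[len(key) :]):
--                         results.append(head + tail)
--                 matched = True
--         if not matched and flawed:
--             for tail in dfs(rem[1:]):
--                 results.append(rem[0] + tail)
--
--         memo[rem] = results
--         return results
--
--     return dfs(word)
-- ===== SOURCE B (Python) =====
-- def decode_recursive(word, mapping, flawed=False):
--     """Iterative decode: forward reachability pass, then a bottom-up table of
--     decodings per suffix position (no recursion, no suffix slicing)."""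
--     items = list(mapping.items())
--     n = len(word)
--     reach = [False] * (n + 1)  # positions the decoder can reach from 0
--     reach[0] = True
--     for i in range(n):
--         if reach[i]:
--             hit = False
--             for key, _val in items:
--                 if key and word.startswith(key, i):
--                     reach[i + len(key)] = True
--                     hit = True
--             if not hit and flawed:
--                 reach[i + 1] = True
--     tab = [[""]]  # tab[-1-j] = decodings of the suffix starting at i+1+j
--     for i in range(n - 1, -1, -1):
--         res = []
--         if reach[i]:
--             matched = False
--             for key, val in items:
--                 if key and word.startswith(key, i):
--                     res.extend(val + t for t in tab[-len(key)])
--                     matched = True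
--             if not matched and flawed:
--                 res = [word[i] + t for t in tab[-1]]
--         tab.append(res)
--     return tab[-1]
-- ===== Notes on version B (the rewrite author's own statement) =====
-- stated objective: alternative
-- what changed: Replaces A's memoized top-down recursion over suffix strings with a forward reachability pass plus an iterative bottom-up table indexed by suffix position: no recursion, no suffix-string slicing, no memo dict keyed by suffixes.
-- outside the precondition, e.g. on decode_recursive('ab', {'': 'x'}, False): A raises RecursionError, B returns []
import Mathlib
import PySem

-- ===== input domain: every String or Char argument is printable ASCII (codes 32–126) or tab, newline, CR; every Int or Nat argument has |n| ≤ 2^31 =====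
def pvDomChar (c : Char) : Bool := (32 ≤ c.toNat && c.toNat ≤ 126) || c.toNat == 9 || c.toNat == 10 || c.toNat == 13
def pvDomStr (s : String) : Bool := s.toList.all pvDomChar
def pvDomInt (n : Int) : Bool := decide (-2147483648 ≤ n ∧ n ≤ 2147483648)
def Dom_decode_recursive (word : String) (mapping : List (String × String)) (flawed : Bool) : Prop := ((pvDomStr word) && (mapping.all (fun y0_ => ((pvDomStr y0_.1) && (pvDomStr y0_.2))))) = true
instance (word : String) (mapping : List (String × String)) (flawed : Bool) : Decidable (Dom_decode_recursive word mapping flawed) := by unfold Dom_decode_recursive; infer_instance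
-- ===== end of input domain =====

-- B replaces A's memoized top-down recursion over suffix strings by a forward
-- reachability pass plus an iterative bottom-up table over suffix positions;
-- equivalence of return values on Pre_ (A raises RecursionError outside it).


-- ===== PORT A =====
-- expand_in_mapping(token, mapping, False): values are str here, so [val] or []
def pvExpandA (key : String) (d : PySem.Dict String String) : List String :=
  match PySem.Dict.get? d key with
  | some v => [v]
  | none => []

-- dfs of A (the memo only caches values and is unobservable; dropped).  Fuel makes the
-- recursion total: it can only run out when mapping has the empty key and word != "",
-- where the Python recurses forever (RecursionError) -- excluded by Pre_.
def pvDfsA (d : PySem.Dict String String) (flawed : Bool) : Nat → List Char → List String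
  | 0, _ => []
  | _ + 1, [] => [""]
  | fuel + 1, c :: rest =>
    let p := (PySem.Dict.keys d).foldl
      (fun (acc : List String × Bool) key =>
        if key.toList.isPrefixOf (c :: rest) then
          ((pvExpandA key d).foldl
            (fun a h => a ++ (pvDfsA d flawed fuel ((c :: rest).drop key.toList.length)).map (fun t => h ++ t))
            acc.1, true)
        else acc)
      (([] : List String), false)
    if !p.2 && flawed then
      p.1 ++ (pvDfsA d flawed fuel rest).map (fun t => String.singleton c ++ t)
    else p.1

def decode_recursive (word : String) (mapping : List (String × String)) (flawed : Bool) : List String :=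
  pvDfsA (PySem.Dict.ofList mapping) flawed (word.toList.length + 1) word.toList

-- ===== PORT B =====
-- forward pass of B: which positions can the decoder reach from position 0
def pvReachStep (w : List Char) (items : List (String × String)) (flawed : Bool)
    (reach : List Bool) (i : Nat) : List Bool :=
  if reach.getD i false = true then
    let p := items.foldl
      (fun (acc : List Bool × Bool) kv =>
        if (!(kv.1 == "")) && kv.1.toList.isPrefixOf (w.drop i) then
          (acc.1.set (i + kv.1.toList.length) true, true)
        else acc)
      (reach, false)
    if !p.2 && flawed then p.1.set (i + 1) true else p.1
  else reach

def pvReachB (w : List Char) (items : List (String × String)) (flawed : Bool) : List Bool :=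
  (List.range w.length).foldl (pvReachStep w items flawed) (true :: List.replicate w.length false)

-- one pass of B's backward loop; tab.getD j = decodings of the suffix starting at i+1+j
-- (the Lean cons-list mirrors Source B's appended list read from its end: tab[-k] = getD (k-1))
def pvStepB (w : List Char) (i : Nat) (items : List (String × String)) (flawed : Bool)
    (reach : List Bool) (tab : List (List String)) : List String :=
  if reach.getD i false = true then
    let p := items.foldl
      (fun (acc : List String × Bool) kv =>
        if (!(kv.1 == "")) && kv.1.toList.isPrefixOf (w.drop i) then
          (acc.1 ++ (tab.getD (kv.1.toList.length - 1) []).map (fun t => kv.2 ++ t), true)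
        else acc)
      (([] : List String), false)
    if !p.2 && flawed then
      (tab.getD 0 []).map (fun t => String.singleton (w.getD i ' ') ++ t)
    else p.1
  else []

def decode_recursive_alt (word : String) (mapping : List (String × String)) (flawed : Bool) : List String :=
  let items := (PySem.Dict.ofList mapping).items
  let w := word.toList
  let n := w.length
  let reach := pvReachB w items flawed
  let tab := (List.range n).foldl (fun tab j => pvStepB w (n - 1 - j) items flawed reach tab :: tab) [[""]]
  tab.getD 0 []


-- ===== PRECONDITION & SPEC =====
-- Pre_ excludes only inputs on which Python A raises (RecursionError): an empty key in
-- mapping makes dfs recurse on the unchanged remainder whenever word ≠ "".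
def Pre_decode_recursive (word : String) (mapping : List (String × String)) (flawed : Bool) : Prop :=
  word = "" ∨ ∀ p ∈ mapping, p.1 ≠ ""
instance (word : String) (mapping : List (String × String)) (flawed : Bool) : Decidable (Pre_decode_recursive word mapping flawed) := by unfold Pre_decode_recursive; infer_instance

def pvWitness_decode_recursive : String × (List (String × String)) × Bool :=
  ("ab", [("a", "x"), ("b", "y")], false)

def Spec_decode_recursive (word : String) (mapping : List (String × String)) (flawed : Bool) (out : List String) : Prop := out = decode_recursive_alt word mapping flawed
instance (word : String) (mapping : List (String × String)) (flawed : Bool) (out : List String) : Decidable (Spec_decode_recursive word mapping flawed out) := by unfold Spec_decode_recursive; infer_instance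

-- ===== CLAIM (what is proved, stated in full; the proofs are below) =====
def Claim_equal_decode_recursive : Prop := ∀ (word : String) (mapping : List (String × String)) (flawed : Bool), Dom_decode_recursive word mapping flawed → Pre_decode_recursive word mapping flawed → Spec_decode_recursive word mapping flawed (decode_recursive word mapping flawed)

-- ===== LEMMAS AND PROOFS =====
def pvDfsC (d : PySem.Dict String String) (flawed : Bool) (rem : List Char) : List String :=
  pvDfsA d flawed (rem.length + 1) rem

-- entry the backward table holds for a suffix position
def pvEntry (d : PySem.Dict String String) (flawed : Bool) (w : List Char)
    (reach : List Bool) (pos : Nat) : List String :=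
  if reach.getD pos false = true ∨ pos = w.length then pvDfsC d flawed (w.drop pos) else []

lemma pvKeyLen (k : String) (h : k ≠ "") : 0 < k.toList.length := by
  rw [List.length_pos_iff]
  intro hc
  exact h (String.toList_inj.mp (by rw [hc]; rfl))

lemma pvGetDMapRange {α : Type} (f : Nat → α) (m j : Nat) (dflt : α) (h : j < m) :
    ((List.range m).map f).getD j dflt = f j := by
  rw [List.getD_eq_getElem?_getD, List.getElem?_map, List.getElem?_range h]; rfl

lemma pvGetDSetTrue (l : List Bool) (m j : Nat) (h : l.getD j false = true) :
    (l.set m true).getD j false = true := by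
  rw [List.getD_eq_getElem?_getD] at *
  rcases eq_or_ne m j with rfl | hne
  · by_cases hm : m < l.length
    · simp [hm]
    · rw [List.set_eq_of_length_le (by omega)]; exact h
  · rw [List.getElem?_set_ne hne]; exact h

lemma pvGetDSetSelf (l : List Bool) (m : Nat) (hm : m < l.length) :
    (l.set m true).getD m false = true := by
  rw [List.getD_eq_getElem?_getD, List.getElem?_set_self hm]; rfl

lemma pvGetDSetLt {α : Type} (l : List α) (m j : Nat) (a d : α) (h : j < m) :
    (l.set m a).getD j d = l.getD j d := by
  rw [List.getD_eq_getElem?_getD, List.getD_eq_getElem?_getD, List.getElem?_set_ne (by omega)]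

-- folds that either leave the accumulator or set a flag
lemma pvFoldFlagMono {α β : Type} (c : β → Bool) (g : List α × Bool → β → List α) :
    ∀ (l : List β) (acc : List α × Bool), acc.2 = true →
      (l.foldl (fun a x => if c x then (g a x, true) else a) acc).2 = true := by
  intro l
  induction l with
  | nil => intro acc h; exact h
  | cons x xs ih =>
    intro acc h
    cases hc : c x <;> simp only [List.foldl, hc, if_true, if_false, Bool.false_eq_true] <;>
      [exact ih acc h; exact ih _ rfl]

lemma pvFoldFlagFalse {α β : Type} (c : β → Bool) (g : List α × Bool → β → List α) :
    ∀ (l : List β) (acc : List α × Bool),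
      (l.foldl (fun a x => if c x then (g a x, true) else a) acc).2 = false →
      l.foldl (fun a x => if c x then (g a x, true) else a) acc = acc := by
  intro l
  induction l with
  | nil => intro acc _; rfl
  | cons x xs ih =>
    intro acc h
    cases hc : c x
    · simp only [List.foldl, hc, Bool.false_eq_true, if_false] at h ⊢
      exact ih acc h
    · exfalso
      simp only [List.foldl, hc, if_true] at h
      have := pvFoldFlagMono c g xs (g acc x, true) rfl
      rw [h] at this
      exact Bool.false_ne_true this

lemma pvFoldFlagNone {α β : Type} (c : β → Bool) (g : List α × Bool → β → List α) :
    ∀ (l : List β) (acc : List α × Bool),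
      (l.foldl (fun a x => if c x then (g a x, true) else a) acc).2 = false →
      ∀ x ∈ l, c x = false := by
  intro l
  induction l with
  | nil => intro acc _ x hx; cases hx
  | cons y ys ih =>
    intro acc h x hx
    cases hc : c y
    · simp only [List.foldl, hc, Bool.false_eq_true, if_false] at h
      rcases List.mem_cons.mp hx with rfl | hx
      · exact hc
      · exact ih acc h x hx
    · exfalso
      simp only [List.foldl, hc, if_true] at h
      have := pvFoldFlagMono c g ys (g acc y, true) rfl
      rw [h] at this
      exact Bool.false_ne_true this

-- properties of the inner fold of pvReachStep
lemma pvInnerLen (w : List Char) (i : Nat) :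
    ∀ (items : List (String × String)) (acc : List Bool × Bool),
      ((items.foldl (fun (acc : List Bool × Bool) kv =>
          if (!(kv.1 == "")) && kv.1.toList.isPrefixOf (w.drop i) then
            (acc.1.set (i + kv.1.toList.length) true, true)
          else acc) acc).1).length = acc.1.length := by
  intro items
  induction items with
  | nil => intro acc; rfl
  | cons kv rest ih =>
    intro acc
    cases hc : (!(kv.1 == "")) && kv.1.toList.isPrefixOf (w.drop i) <;>
      simp only [List.foldl, hc, if_true, if_false, Bool.false_eq_true] <;>
      rw [ih] <;> simp

lemma pvInnerMono (w : List Char) (i : Nat) :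
    ∀ (items : List (String × String)) (acc : List Bool × Bool) (j : Nat),
      acc.1.getD j false = true →
      ((items.foldl (fun (acc : List Bool × Bool) kv =>
          if (!(kv.1 == "")) && kv.1.toList.isPrefixOf (w.drop i) then
            (acc.1.set (i + kv.1.toList.length) true, true)
          else acc) acc).1).getD j false = true := by
  intro items
  induction items with
  | nil => intro acc j h; exact h
  | cons kv rest ih =>
    intro acc j h
    cases hc : (!(kv.1 == "")) && kv.1.toList.isPrefixOf (w.drop i) <;>
      simp only [List.foldl, hc, if_true, if_false, Bool.false_eq_true]
    · exact ih acc j h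
    · exact ih _ j (pvGetDSetTrue _ _ _ h)

lemma pvInnerLe (w : List Char) (i : Nat) :
    ∀ (items : List (String × String)) (acc : List Bool × Bool) (j : Nat), j ≤ i →
      ((items.foldl (fun (acc : List Bool × Bool) kv =>
          if (!(kv.1 == "")) && kv.1.toList.isPrefixOf (w.drop i) then
            (acc.1.set (i + kv.1.toList.length) true, true)
          else acc) acc).1).getD j false = acc.1.getD j false := by
  intro items
  induction items with
  | nil => intro acc j _; rfl
  | cons kv rest ih =>
    intro acc j hj
    cases hc : (!(kv.1 == "")) && kv.1.toList.isPrefixOf (w.drop i)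
    · simp only [List.foldl, hc, Bool.false_eq_true, if_false]
      exact ih acc j hj
    · simp only [List.foldl, hc, if_true]
      rw [ih _ j hj]
      have hk : kv.1 ≠ "" := by
        simp only [Bool.and_eq_true, Bool.not_eq_true'] at hc
        exact fun he => by simp [he] at hc
      have := pvKeyLen kv.1 hk
      exact pvGetDSetLt _ _ _ _ _ (by omega)

lemma pvInnerHit (w : List Char) (i : Nat) :
    ∀ (items : List (String × String)) (acc : List Bool × Bool) (kv : String × String),
      kv ∈ items →
      ((!(kv.1 == "")) && kv.1.toList.isPrefixOf (w.drop i)) = true →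
      i + kv.1.toList.length < acc.1.length →
      ((items.foldl (fun (acc : List Bool × Bool) kv =>
          if (!(kv.1 == "")) && kv.1.toList.isPrefixOf (w.drop i) then
            (acc.1.set (i + kv.1.toList.length) true, true)
          else acc) acc).1).getD (i + kv.1.toList.length) false = true := by
  intro items
  induction items with
  | nil => intro acc kv hkv; cases hkv
  | cons y rest ih =>
    intro acc kv hkv hc hlt
    rcases List.mem_cons.mp hkv with rfl | hkv
    · simp only [List.foldl, hc, if_true]
      exact pvInnerMono w i rest _ _ (pvGetDSetSelf _ _ hlt)
    · cases hy : (!(y.1 == "")) && y.1.toList.isPrefixOf (w.drop i) <;>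
        simp only [List.foldl, hy, if_true, if_false, Bool.false_eq_true]
      · exact ih acc kv hkv hc hlt
      · exact ih _ kv hkv hc (by rw [List.length_set]; exact hlt)

-- properties of pvReachStep
lemma pvStepLen (w : List Char) (items : List (String × String)) (flawed : Bool)
    (reach : List Bool) (i : Nat) :
    (pvReachStep w items flawed reach i).length = reach.length := by
  simp only [pvReachStep]
  split_ifs <;> try rfl
  · rw [List.length_set, pvInnerLen]
  · rw [pvInnerLen]

lemma pvStepMono (w : List Char) (items : List (String × String)) (flawed : Bool)
    (reach : List Bool) (i j : Nat) (h : reach.getD j false = true) :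
    (pvReachStep w items flawed reach i).getD j false = true := by
  simp only [pvReachStep]
  split_ifs
  · exact pvGetDSetTrue _ _ _ (pvInnerMono w i items (reach, false) j h)
  · exact pvInnerMono w i items (reach, false) j h
  · exact h

lemma pvStepLe (w : List Char) (items : List (String × String)) (flawed : Bool)
    (reach : List Bool) (i j : Nat) (hj : j ≤ i) :
    (pvReachStep w items flawed reach i).getD j false = reach.getD j false := by
  simp only [pvReachStep]
  split_ifs
  · rw [pvGetDSetLt _ _ _ _ _ (by omega), pvInnerLe w i items (reach, false) j hj]
  · rw [pvInnerLe w i items (reach, false) j hj]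
  · rfl

lemma pvFoldReachLen (w : List Char) (items : List (String × String)) (flawed : Bool) :
    ∀ (ks : List Nat) (reach : List Bool),
      (ks.foldl (pvReachStep w items flawed) reach).length = reach.length := by
  intro ks
  induction ks with
  | nil => intro reach; rfl
  | cons k rest ih => intro reach; rw [List.foldl_cons, ih, pvStepLen]

lemma pvFoldReachMono (w : List Char) (items : List (String × String)) (flawed : Bool) :
    ∀ (ks : List Nat) (reach : List Bool) (j : Nat), reach.getD j false = true →
      (ks.foldl (pvReachStep w items flawed) reach).getD j false = true := by
  intro ks
  induction ks with
  | nil => intro reach j h; exact h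
  | cons k rest ih => intro reach j h; exact ih _ j (pvStepMono w items flawed reach k j h)

lemma pvFoldReachLe (w : List Char) (items : List (String × String)) (flawed : Bool) :
    ∀ (ks : List Nat) (reach : List Bool) (j : Nat), (∀ p ∈ ks, j ≤ p) →
      (ks.foldl (pvReachStep w items flawed) reach).getD j false = reach.getD j false := by
  intro ks
  induction ks with
  | nil => intro reach j _; rfl
  | cons k rest ih =>
    intro reach j h
    rw [List.foldl_cons, ih _ j (fun p hp => h p (List.mem_cons_of_mem _ hp)),
      pvStepLe w items flawed reach k j (h k List.mem_cons_self)]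

lemma pvReachZero (w : List Char) (items : List (String × String)) (flawed : Bool) :
    (pvReachB w items flawed).getD 0 false = true := by
  rw [pvReachB]
  exact pvFoldReachMono w items flawed _ _ 0 rfl

-- the value the forward pass reads at position i is its final value
lemma pvReachAt (w : List Char) (items : List (String × String)) (flawed : Bool)
    (i : Nat) (hi : i ≤ w.length) :
    (pvReachB w items flawed).getD i false
      = ((List.range i).foldl (pvReachStep w items flawed)
          (true :: List.replicate w.length false)).getD i false := by
  rw [pvReachB, show w.length = i + (w.length - i) by omega, List.range_add, List.foldl_append]
  exact pvFoldReachLe w items flawed _ _ i (by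
    intro p hp
    rcases List.mem_map.mp hp with ⟨k, _, rfl⟩
    omega)

-- reachability is closed under the decoder's moves
lemma pvReachClosure (w : List Char) (items : List (String × String)) (flawed : Bool)
    (i : Nat) (hi : i < w.length)
    (hr : (pvReachB w items flawed).getD i false = true) :
    (∀ kv ∈ items, ((!(kv.1 == "")) && kv.1.toList.isPrefixOf (w.drop i)) = true →
        (pvReachB w items flawed).getD (i + kv.1.toList.length) false = true)
    ∧ ((∀ kv ∈ items, ((!(kv.1 == "")) && kv.1.toList.isPrefixOf (w.drop i)) = false) →
        flawed = true → (pvReachB w items flawed).getD (i + 1) false = true) := by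
  have hsplit : pvReachB w items flawed
      = ((List.range (w.length - i - 1)).map (fun x => (i + 1) + x)).foldl
          (pvReachStep w items flawed)
          (pvReachStep w items flawed
            ((List.range i).foldl (pvReachStep w items flawed)
              (true :: List.replicate w.length false)) i) := by
    have hrange : List.range w.length
        = List.range (i + 1) ++ (List.range (w.length - i - 1)).map (fun x => (i + 1) + x) := by
      conv_lhs => rw [show w.length = (i + 1) + (w.length - i - 1) by omega]
      exact List.range_add
    rw [pvReachB, hrange, List.foldl_append, List.range_succ, List.foldl_append,
      List.foldl_cons, List.foldl_nil]
  set S0 := (List.range i).foldl (pvReachStep w items flawed)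
      (true :: List.replicate w.length false) with hS0
  have hS0len : S0.length = w.length + 1 := by
    rw [hS0, pvFoldReachLen]; simp
  have hr0 : S0.getD i false = true := by
    rw [pvReachAt w items flawed i (by omega)] at hr
    exact hr
  have hmono : ∀ j, (pvReachStep w items flawed S0 i).getD j false = true →
      (pvReachB w items flawed).getD j false = true := by
    intro j h
    rw [hsplit]
    exact pvFoldReachMono w items flawed _ _ j h
  constructor
  · intro kv hkv hc
    apply hmono
    simp only [pvReachStep]
    rw [if_pos hr0]
    have hk : kv.1 ≠ "" := by
      simp only [Bool.and_eq_true, Bool.not_eq_true'] at hc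
      exact fun he => by simp [he] at hc
    have hpre : kv.1.toList.isPrefixOf (w.drop i) = true := by
      simp only [Bool.and_eq_true] at hc
      exact hc.2
    have hle : kv.1.toList.length ≤ (w.drop i).length :=
      (List.isPrefixOf_iff_prefix.mp hpre).length_le
    simp only [List.length_drop] at hle
    have hhit := pvInnerHit w i items (S0, false) kv hkv hc
      (by simp only [hS0len]; omega)
    split_ifs
    · exact pvGetDSetTrue _ _ _ hhit
    · exact hhit
  · intro hnone hfl
    apply hmono
    simp only [pvReachStep]
    rw [if_pos hr0]
    have hfold : items.foldl
        (fun (acc : List Bool × Bool) kv =>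
          if (!(kv.1 == "")) && kv.1.toList.isPrefixOf (w.drop i) then
            (acc.1.set (i + kv.1.toList.length) true, true)
          else acc) (S0, false) = (S0, false) := by
      rw [PySem.List.foldl_congr_mem _ _ (fun acc _ => acc) _
        (fun acc kv hkv => by rw [hnone kv hkv]; simp),
        PySem.List.foldl_ignore]
    rw [hfold]
    simp only [hfl, Bool.not_false, Bool.and_self, if_true]
    exact pvGetDSetSelf _ _ (by omega)

lemma pvDfs_fuel (d : PySem.Dict String String) (flawed : Bool)
    (hne : ∀ k ∈ PySem.Dict.keys d, k ≠ "") :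
    ∀ (n : Nat) (rem : List Char), rem.length ≤ n → ∀ (f₁ f₂ : Nat),
      rem.length < f₁ → rem.length < f₂ →
      pvDfsA d flawed f₁ rem = pvDfsA d flawed f₂ rem := by
  intro n
  induction n with
  | zero =>
    intro rem hlen f₁ f₂ h1 h2
    have : rem = [] := List.length_eq_zero_iff.mp (Nat.le_zero.mp hlen)
    subst this
    cases f₁ with
    | zero => omega
    | succ g₁ => cases f₂ with
      | zero => omega
      | succ g₂ => rfl
  | succ n ih =>
    intro rem hlen f₁ f₂ h1 h2
    cases rem with
    | nil =>
      cases f₁ with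
      | zero => omega
      | succ g₁ => cases f₂ with
        | zero => omega
        | succ g₂ => rfl
    | cons c rest =>
      cases f₁ with
      | zero => omega
      | succ g₁ => cases f₂ with
        | zero => omega
        | succ g₂ =>
          simp only [pvDfsA]
          have hfold : ∀ key ∈ PySem.Dict.keys d, ∀ (acc : List String × Bool),
              (if key.toList.isPrefixOf (c :: rest) then
                ((pvExpandA key d).foldl
                  (fun a h => a ++ (pvDfsA d flawed g₁ ((c :: rest).drop key.toList.length)).map (fun t => h ++ t))
                  acc.1, true)
              else acc)
              = (if key.toList.isPrefixOf (c :: rest) then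
                ((pvExpandA key d).foldl
                  (fun a h => a ++ (pvDfsA d flawed g₂ ((c :: rest).drop key.toList.length)).map (fun t => h ++ t))
                  acc.1, true)
              else acc) := by
            intro key hkey acc
            cases hp : key.toList.isPrefixOf (c :: rest)
            · simp only [Bool.false_eq_true, if_false]
            · simp only [if_true]
              have hlenk := pvKeyLen key (hne key hkey)
              have hle : key.toList.length ≤ (c :: rest).length :=
                (List.isPrefixOf_iff_prefix.mp hp).length_le
              rw [ih ((c :: rest).drop key.toList.length)
                (by simp [List.length_drop] at *; omega) g₁ g₂
                (by simp [List.length_drop] at *; omega)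
                (by simp [List.length_drop] at *; omega)]
          rw [PySem.List.foldl_congr_mem _ _ _ _ (fun acc x hx => hfold x hx acc),
            ih rest (by simp at hlen; omega) g₁ g₂ (by simp at h1; omega) (by simp at h2; omega)]

lemma pvStep_eq (d : PySem.Dict String String) (flawed : Bool)
    (hne : ∀ k ∈ PySem.Dict.keys d, k ≠ "") (hnd : (PySem.Dict.keys d).Nodup)
    (w : List Char) (i : Nat) (hi : i < w.length) :
    pvStepB w i d.items flawed (pvReachB w d.items flawed)
        ((List.range (w.length - i)).map
          (fun j => pvEntry d flawed w (pvReachB w d.items flawed) (i + 1 + j)))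
      = pvEntry d flawed w (pvReachB w d.items flawed) i := by
  have hkeys : PySem.Dict.keys d = d.items.map (·.1) := rfl
  by_cases hri : (pvReachB w d.items flawed).getD i false = true
  · -- reachable: the entry is dfs of the suffix
    have hd : w.drop i = w[i] :: w.drop (i + 1) := List.drop_eq_getElem_cons hi
    have hcl := pvReachClosure w d.items flawed i hi hri
    have hboolne : ∀ kv ∈ d.items, (!(kv.1 == "")) = true := by
      intro kv hkv
      have : kv.1 ≠ "" := hne kv.1 (by rw [hkeys]; exact List.mem_map.mpr ⟨kv, hkv, rfl⟩)
      simp [this]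
    rw [pvEntry, if_pos (Or.inl hri), pvDfsC, hd]
    simp only [pvStepB, if_pos hri]
    simp only [List.length_cons, pvDfsA, hd, hkeys, List.foldl_map]
    have hfold :
        List.foldl (fun (acc : List String × Bool) kv =>
            if ((!(kv.1 == "")) && kv.1.toList.isPrefixOf (w[i] :: List.drop (i+1) w)) = true then
              (acc.1 ++ List.map (fun t => kv.2 ++ t)
                  ((List.map (fun j => pvEntry d flawed w (pvReachB w d.items flawed) (i+1+j))
                      (List.range (w.length - i))).getD (kv.1.toList.length - 1) []), true)
            else acc) ([], false) d.items
      = List.foldl (fun (x : List String × Bool) y =>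
            if y.1.toList.isPrefixOf (w[i] :: List.drop (i+1) w) = true then
              (List.foldl (fun a h => a ++ List.map (fun t => h ++ t)
                  (pvDfsA d flawed ((List.drop (i+1) w).length + 1)
                    (List.drop y.1.toList.length (w[i] :: List.drop (i+1) w)))) x.1 (pvExpandA y.1 d), true)
            else x) ([], false) d.items := by
      apply PySem.List.foldl_congr_mem
      intro acc kv hkv
      rw [hboolne kv hkv, Bool.true_and]
      cases hp : kv.1.toList.isPrefixOf (w[i] :: List.drop (i+1) w)
      · simp only [Bool.false_eq_true, if_false]
      · simp only [if_true]
        have hget : PySem.Dict.get? d kv.1 = some kv.2 :=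
          PySem.Dict.get?_of_mem_items d hkv hnd
        have hk1 : kv.1 ∈ PySem.Dict.keys d := by
          rw [hkeys]; exact List.mem_map.mpr ⟨kv, hkv, rfl⟩
        have hlenk : 0 < kv.1.toList.length := pvKeyLen kv.1 (hne kv.1 hk1)
        have hle : kv.1.toList.length ≤ (w[i] :: List.drop (i+1) w).length :=
          (List.isPrefixOf_iff_prefix.mp hp).length_le
        simp only [List.length_cons, List.length_drop] at hle
        have hdrop : List.drop kv.1.toList.length (w[i] :: List.drop (i+1) w)
            = List.drop (i + kv.1.toList.length) w := by
          rw [← hd, List.drop_drop]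
        have hidx : kv.1.toList.length - 1 < w.length - i := by omega
        rw [pvGetDMapRange _ _ _ _ hidx, hdrop]
        have harg : i + 1 + (kv.1.toList.length - 1) = i + kv.1.toList.length := by omega
        rw [harg]
        have hreach : (pvReachB w d.items flawed).getD (i + kv.1.toList.length) false = true := by
          apply hcl.1 kv hkv
          rw [hd, hboolne kv hkv, Bool.true_and]
          exact hp
        rw [pvEntry, if_pos (Or.inl hreach)]
        simp only [pvExpandA, hget, List.foldl_cons, List.foldl_nil]
        have hfuel : pvDfsC d flawed (List.drop (i + kv.1.toList.length) w)
            = pvDfsA d flawed ((List.drop (i+1) w).length + 1)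
                (List.drop (i + kv.1.toList.length) w) := by
          rw [pvDfsC]
          exact pvDfs_fuel d flawed hne w.length _
            (by simp only [List.length_drop]; omega) _ _
            (by simp only [List.length_drop]; omega)
            (by simp only [List.length_drop]; omega)
        rw [hfuel]
    rw [hfold]
    split_ifs with hb
    · simp only [Bool.and_eq_true, Bool.not_eq_true'] at hb
      rw [pvFoldFlagFalse _ _ _ _ hb.1]
      have hnone : ∀ kv ∈ d.items,
          ((!(kv.1 == "")) && kv.1.toList.isPrefixOf (w.drop i)) = false := by
        intro kv hkv
        rw [hd]
        have := pvFoldFlagNone _ _ d.items ([], false) hb.1 kv hkv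
        rw [hboolne kv hkv, Bool.true_and]
        exact this
      have hreach1 : (pvReachB w d.items flawed).getD (i + 1) false = true :=
        hcl.2 hnone hb.2
      rw [pvGetDMapRange _ _ _ _ (show 0 < w.length - i by omega)]
      rw [show i + 1 + 0 = i + 1 by omega, pvEntry, if_pos (Or.inl hreach1)]
      simp only [pvDfsC, List.getD_eq_getElem w ' ' hi, List.nil_append]
    · rfl
  · -- unreachable: both sides are []
    rw [pvStepB, if_neg hri, pvEntry, if_neg ?_]
    intro h
    rcases h with h | h
    · exact hri h
    · omega

lemma pvTab_inv (d : PySem.Dict String String) (flawed : Bool)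
    (hne : ∀ k ∈ PySem.Dict.keys d, k ≠ "") (hnd : (PySem.Dict.keys d).Nodup)
    (w : List Char) :
    ∀ m, m ≤ w.length →
      (List.range m).foldl
          (fun tab j => pvStepB w (w.length - 1 - j) d.items flawed (pvReachB w d.items flawed) tab :: tab) [[""]]
        = (List.range (m + 1)).map
            (fun j => pvEntry d flawed w (pvReachB w d.items flawed) (w.length - m + j)) := by
  intro m
  induction m with
  | zero =>
    intro _
    simp [pvEntry, pvDfsC, pvDfsA, List.drop_length]
  | succ m ih =>
    intro hm
    rw [List.range_succ, List.foldl_append, ih (by omega), List.foldl_cons, List.foldl_nil]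
    have hstep := pvStep_eq d flawed hne hnd w (w.length - 1 - m) (by omega)
    have hcnt : w.length - (w.length - 1 - m) = m + 1 := by omega
    rw [hcnt] at hstep
    have hfun : (List.range (m+1)).map
          (fun j => pvEntry d flawed w (pvReachB w d.items flawed) (w.length - 1 - m + 1 + j))
        = (List.range (m+1)).map
          (fun j => pvEntry d flawed w (pvReachB w d.items flawed) (w.length - m + j)) := by
      apply List.map_congr_left
      intro a _
      have : w.length - 1 - m + 1 + a = w.length - m + a := by omega
      rw [this]
    rw [hfun] at hstep
    have hr : (List.range (m+1+1)).map
          (fun j => pvEntry d flawed w (pvReachB w d.items flawed) (w.length - (m+1) + j))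
        = pvEntry d flawed w (pvReachB w d.items flawed) (w.length - 1 - m)
          :: (List.range (m+1)).map
            (fun j => pvEntry d flawed w (pvReachB w d.items flawed) (w.length - m + j)) := by
      rw [List.range_succ_eq_map, List.map_cons, List.map_map]
      congr 1
      · have : w.length - (m + 1) + 0 = w.length - 1 - m := by omega
        rw [this]
      · apply List.map_congr_left
        intro a _
        simp only [Function.comp_apply, Nat.succ_eq_add_one]
        have : w.length - (m + 1) + (a + 1) = w.length - m + a := by omega
        rw [this]
    rw [hstep, hr]

lemma pvKeysOfList (mapping : List (String × String)) :
    (PySem.Dict.ofList mapping).keys = PySem.Set.ofList (mapping.map (·.1)) := by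
  simp [PySem.Dict.ofList, PySem.Dict.update, PySem.Dict.keys_foldl_insert_key,
    PySem.Set.update_nil_left]

-- ===== VERDICT (by name: the statement is the Claim_ definition above) =====
theorem decode_recursive_spec : Claim_equal_decode_recursive := by
  intro word mapping flawed _hdom hpre
  unfold Spec_decode_recursive
  rcases hpre with hw | hne'
  · subst hw
    simp [decode_recursive, decode_recursive_alt, pvDfsA]
  · have hne : ∀ k ∈ PySem.Dict.keys (PySem.Dict.ofList mapping), k ≠ "" := by
      intro k hk
      rw [pvKeysOfList, PySem.Set.mem_ofList] at hk
      rcases List.mem_map.mp hk with ⟨p, hp, hpk⟩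
      exact hpk ▸ hne' p hp
    have hnd : (PySem.Dict.keys (PySem.Dict.ofList mapping)).Nodup :=
      PySem.Dict.nodup_keys_ofList mapping
    rw [decode_recursive, decode_recursive_alt]
    have htab := pvTab_inv (PySem.Dict.ofList mapping) flawed hne hnd word.toList
      word.toList.length le_rfl
    simp only [htab]
    rw [pvGetDMapRange _ _ 0 _ (by omega)]
    rw [show word.toList.length - word.toList.length + 0 = 0 by omega]
    rw [pvEntry, if_pos (Or.inl (pvReachZero word.toList (PySem.Dict.ofList mapping).items flawed))]
    simp [pvDfsC]
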